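-- pv_equiv track=rewrite | github.com/uf-icbr-bioinformatics/ba3p | bin/writeModelXML.py | makeFromLine
-- ===== SOURCE A (Python) =====
-- def makeFromLine(n, i):
--     d = []
--     for row in range(n):
--         for col in range(n):
--             if row == i:
--                 if col == i:
--                     d.append("0")
--                 else:
--                     d.append("1")
--             else:
--                 d.append("0")
--     return d
-- ===== SOURCE B (Python) =====
-- def makeFromLine(n, i):
--     size = max(n, 0)
--     d = ["0"] * (size * size)
--     if 0 <= i < size:
--         for col in range(size):
--             if col != i:
--                 d[size * i + col] = "1"
--     return d
-- ===== Notes on version B (the rewrite author's own statement) =====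
-- stated objective: alternative
-- what changed: Instead of A's per-cell nested loops with a double branch appending cell by cell, B allocates the whole flat matrix as zeros in one bulk list multiplication and then, only when row i exists, does a single O(n) pass writing the "1"s of row i (skipping the diagonal).
import Mathlib
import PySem

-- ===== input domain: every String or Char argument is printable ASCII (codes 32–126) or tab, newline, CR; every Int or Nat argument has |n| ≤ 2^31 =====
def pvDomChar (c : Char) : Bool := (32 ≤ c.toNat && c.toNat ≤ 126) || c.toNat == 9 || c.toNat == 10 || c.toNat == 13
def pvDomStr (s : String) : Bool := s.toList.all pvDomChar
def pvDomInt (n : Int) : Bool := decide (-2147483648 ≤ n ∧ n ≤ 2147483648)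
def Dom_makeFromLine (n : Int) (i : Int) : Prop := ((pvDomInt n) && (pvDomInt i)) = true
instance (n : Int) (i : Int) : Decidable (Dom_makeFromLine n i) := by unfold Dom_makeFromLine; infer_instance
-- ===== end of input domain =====

-- B replaces A's per-cell nested append loops by one bulk all-"0" allocation plus a single
-- targeted pass writing the "1"s of row i (a different decomposition of the same matrix).

-- ===== PORT A =====
def makeFromLine (n : Int) (i : Int) : List String :=
  (PySem.List.pyRange 0 n 1).foldl (fun d row =>
    (PySem.List.pyRange 0 n 1).foldl (fun d col =>
      if row = i then
        if col = i then d ++ ["0"] else d ++ ["1"]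
      else d ++ ["0"]) d) []

-- ===== PORT B =====
def makeFromLine_alt (n : Int) (i : Int) : List String :=
  let size := max n 0
  let d := List.replicate (size * size).toNat "0"
  if 0 ≤ i ∧ i < size then
    -- d[size*i+col] = "1": index is nonnegative and in range here, so List.set is exact
    (PySem.List.pyRange 0 size 1).foldl (fun d col =>
      if col ≠ i then d.set (size * i + col).toNat "1" else d) d
  else d

-- ===== PRECONDITION & SPEC =====
def Spec_makeFromLine (n : Int) (i : Int) (out : List String) : Prop := out = makeFromLine_alt n i
instance (n : Int) (i : Int) (out : List String) : Decidable (Spec_makeFromLine n i out) := by unfold Spec_makeFromLine; infer_instance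

-- ===== CLAIM (what is proved, stated in full; the proofs are below) =====
def Claim_equal_makeFromLine : Prop := ∀ (n : Int) (i : Int), Dom_makeFromLine n i → Spec_makeFromLine n i (makeFromLine n i)

-- ===== LEMMAS AND PROOFS =====

/-- The matrix both programs compute, as a row-major flatMap. -/
def pvMat (m : Nat) (i : Int) : List String :=
  (List.range m).flatMap (fun (row : Nat) =>
    (List.range m).map (fun (col : Nat) =>
      if (row : Int) = i then (if (col : Int) = i then "0" else "1") else "0"))

lemma pvA_eq (n i : Int) : makeFromLine n i = pvMat n.toNat i := by
  unfold makeFromLine pvMat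
  rw [PySem.List.pyRange_one]
  simp only [Int.sub_zero, List.foldl_map, zero_add]
  have h2 : ∀ (row : Nat) (d : List String),
      (List.range n.toNat).foldl (fun (d : List String) (col : Nat) =>
        if (row : Int) = i then (if (col : Int) = i then d ++ ["0"] else d ++ ["1"]) else d ++ ["0"]) d
      = d ++ (List.range n.toNat).map (fun (col : Nat) =>
          if (row : Int) = i then (if (col : Int) = i then "0" else "1") else "0") := by
    intro row d
    have hfun : (fun (d : List String) (col : Nat) =>
        if (row : Int) = i then (if (col : Int) = i then d ++ ["0"] else d ++ ["1"]) else d ++ ["0"])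
        = fun (d : List String) (col : Nat) =>
            d ++ [if (row : Int) = i then (if (col : Int) = i then "0" else "1") else "0"] := by
      funext d col; split_ifs <;> rfl
    rw [hfun, PySem.List.foldl_append_singleton_eq_map]
  simp only [h2]
  rw [PySem.List.foldl_append_eq_flatMap, List.nil_append]

lemma pvFlatMap_zero (m : Nat) (i : Int) (l : List Nat) (h : ∀ row ∈ l, (row : Int) ≠ i) :
    l.flatMap (fun (row : Nat) => (List.range m).map (fun (col : Nat) =>
        if (row : Int) = i then (if (col : Int) = i then "0" else "1") else "0"))
      = List.replicate (l.length * m) "0" := by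
  induction l with
  | nil => simp
  | cons a t ih =>
    have ha : (a : Int) ≠ i := h a (by simp)
    simp only [List.flatMap_cons, ih (fun r hr => h r (List.mem_cons_of_mem _ hr)),
      if_neg ha, List.map_const', List.length_range, List.length_cons]
    rw [← List.replicate_add]
    congr 1
    ring

lemma pvMat_in (m j : Nat) (hj : j < m) :
    pvMat m (j : Int) =
      List.replicate (j * m) "0" ++
      (List.range m).map (fun col => if col = j then "0" else "1") ++
      List.replicate ((m - j - 1) * m) "0" := by
  unfold pvMat
  set g : Nat → List String := fun (row : Nat) => (List.range m).map (fun (col : Nat) =>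
    if (row : Int) = (j : Int) then (if (col : Int) = (j : Int) then "0" else "1") else "0") with hg
  have hsplit : List.range m = (List.range j ++ [j]) ++ (List.range (m - j - 1)).map (fun k => (j + 1) + k) := by
    have h1 : m = (j + 1) + (m - j - 1) := by omega
    calc List.range m = List.range ((j + 1) + (m - j - 1)) := by rw [← h1]
      _ = List.range (j + 1) ++ (List.range (m - j - 1)).map (fun k => (j + 1) + k) := List.range_add
      _ = (List.range j ++ [j]) ++ (List.range (m - j - 1)).map (fun k => (j + 1) + k) := by
            rw [List.range_succ]
  rw [hsplit, List.flatMap_append, List.flatMap_append]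
  have p1 : (List.range j).flatMap g = List.replicate (j * m) "0" := by
    rw [hg, pvFlatMap_zero m (j : Int) (List.range j)
      (by intro r hr; have := List.mem_range.mp hr; exact_mod_cast Nat.ne_of_lt this)]
    rw [List.length_range]
  have p2 : ([j] : List Nat).flatMap g =
      (List.range m).map (fun col => if col = j then "0" else "1") := by
    simp [hg, Nat.cast_inj]
  have p3 : ((List.range (m - j - 1)).map (fun k => (j + 1) + k)).flatMap g =
      List.replicate ((m - j - 1) * m) "0" := by
    rw [hg, pvFlatMap_zero m (j : Int) _
      (by intro r hr
          simp only [List.mem_map, List.mem_range] at hr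
          obtain ⟨k, _, hk⟩ := hr
          have : j < r := by omega
          exact_mod_cast (Nat.ne_of_lt this).symm)]
    simp
  rw [p1, p2, p3, ← hsplit]

lemma pvB_fold (m j : Nat) (hj : j < m) (t : Nat) (ht : t ≤ m) :
    (List.range t).foldl (fun d col => if col ≠ j then d.set (m * j + col) "1" else d)
        (List.replicate (m * m) "0")
      = List.replicate (j * m) "0" ++
        (List.range t).map (fun col => if col = j then "0" else "1") ++
        List.replicate (m * m - j * m - t) "0" := by
  induction t with
  | zero =>
    have hle : j * m ≤ m * m := Nat.mul_le_mul_right m (le_of_lt hj)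
    simp only [List.range_zero, List.foldl_nil, List.map_nil, List.append_nil, Nat.sub_zero]
    rw [← List.replicate_add, Nat.add_sub_cancel' hle]
  | succ t ih =>
    have ht' : t ≤ m := by omega
    have hmm : j * m + m ≤ m * m := by
      calc j * m + m = (j + 1) * m := by ring
        _ ≤ m * m := Nat.mul_le_mul_right m hj
    have hlt : j * m + t < m * m := by omega
    rw [List.range_succ, List.foldl_append, ih ht']
    simp only [List.foldl_cons, List.foldl_nil, List.map_append, List.map_cons, List.map_nil]
    by_cases hc : t = j
    · rw [if_neg (by simp [hc]), if_pos hc,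
          show m * m - j * m - t = (m * m - j * m - (t + 1)) + 1 from by omega,
          List.replicate_succ]
      simp
    · rw [if_pos hc, if_neg hc, ← List.append_assoc, List.set_append]
      simp only [List.length_append, List.length_replicate, List.length_map, List.length_range]
      rw [if_neg (by rw [Nat.mul_comm m j]; exact lt_irrefl _),
          show m * j + t - (j * m + t) = 0 from by rw [Nat.mul_comm m j]; exact Nat.sub_self _,
          show m * m - j * m - t = (m * m - j * m - (t + 1)) + 1 from by omega,
          List.replicate_succ, List.set_cons_zero]
      simp [List.append_assoc]

-- ===== VERDICT (by name: the statement is the Claim_ definition above) =====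
theorem makeFromLine_spec : Claim_equal_makeFromLine := by
  intro n i _
  show makeFromLine n i = makeFromLine_alt n i
  rw [pvA_eq]
  have hsize : max n 0 = ((n.toNat : Nat) : Int) := (Int.ofNat_toNat n).symm
  by_cases hin : 0 ≤ i ∧ i < max n 0
  · -- row i exists
    obtain ⟨hi0, hiltn⟩ := hin
    have hi : i = ((i.toNat : Nat) : Int) := (Int.toNat_of_nonneg hi0).symm
    have hjm : i.toNat < n.toNat := by rw [hsize] at hiltn; omega
    simp only [makeFromLine_alt, hsize]
    rw [if_pos (⟨hi0, by rw [← hsize]; exact hiltn⟩ :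
      0 ≤ i ∧ i < ((n.toNat : Nat) : Int))]
    rw [PySem.List.pyRange_zero_natCast, List.foldl_map]
    have hstep : (fun (d : List String) (col : Nat) =>
        if (col : Int) ≠ i then d.set (((n.toNat : Nat) : Int) * i + (col : Int)).toNat "1" else d)
        = fun (d : List String) (col : Nat) =>
            if col ≠ i.toNat then d.set (n.toNat * i.toNat + col) "1" else d := by
      funext d col
      by_cases h : col = i.toNat
      · simp [h, ← hi]
      · have hne : (col : Int) ≠ i := fun hcol => h (by rw [hi] at hcol; exact_mod_cast hcol)
        rw [if_pos hne, if_pos h]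
        congr 1
        conv_lhs => rw [hi]
        rw [← Nat.cast_mul, ← Nat.cast_add, Int.toNat_natCast]
    rw [hstep,
      show ((n.toNat : Int) * (n.toNat : Int)).toNat = n.toNat * n.toNat from by
        rw [← Nat.cast_mul, Int.toNat_natCast],
      pvB_fold n.toNat i.toNat hjm n.toNat (le_refl _)]
    conv_lhs => rw [hi]
    rw [pvMat_in n.toNat i.toNat hjm]
    congr 1
    rw [Nat.sub_mul, Nat.sub_mul, one_mul]
  · -- no row is special: both sides are all-"0"
    simp only [makeFromLine_alt, if_neg hin]
    rw [show ((max n 0) * (max n 0)).toNat = n.toNat * n.toNat from by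
      rw [hsize, ← Nat.cast_mul, Int.toNat_natCast]]
    have hne : ∀ row ∈ List.range n.toNat, (row : Int) ≠ i := by
      intro row hrow
      rw [hsize] at hin
      have h1 : (row : Int) < (n.toNat : Int) := by
        exact_mod_cast List.mem_range.mp hrow
      omega
    unfold pvMat
    rw [pvFlatMap_zero n.toNat i (List.range n.toNat) hne, List.length_range]
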